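-- pv_equiv track=rewrite | github.com/streamer-AP/research-figures | skills/drawio-architecture-diagram/scripts/plan_from_source.py | detect_title
-- ===== SOURCE A (Python) =====
-- def detect_title(lines: list[str]) -> str:
--     for line in lines:
--         if line.startswith("#"):
--             return line.lstrip("#").strip()
--     for line in lines:
--         raw = line.strip()
--         if not raw:
--             continue
--         if raw.startswith(("```", "-", "*")):
--             continue
--         if len(raw) <= 40:
--             return raw
--     return "未命名架构图"
-- ===== SOURCE B (Python) =====
-- def detect_title(lines: list[str]) -> str:
--     candidate = None
--     for line in lines:
--         if line.startswith("#"):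
--             return line.lstrip("#").strip()
--         if candidate is None:
--             raw = line.strip()
--             if raw and not raw.startswith(("```", "-", "*")) and len(raw) <= 40:
--                 candidate = raw
--     return candidate if candidate is not None else "未命名架构图"
-- ===== Notes on version B (the rewrite author's own statement) =====
-- stated objective: alternative
-- what changed: A's two sequential scans (headings first, then short-plain-line fallback) are fused into one pass that returns on the first heading and remembers the first qualifying fallback line as a candidate.
import Mathlib
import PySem

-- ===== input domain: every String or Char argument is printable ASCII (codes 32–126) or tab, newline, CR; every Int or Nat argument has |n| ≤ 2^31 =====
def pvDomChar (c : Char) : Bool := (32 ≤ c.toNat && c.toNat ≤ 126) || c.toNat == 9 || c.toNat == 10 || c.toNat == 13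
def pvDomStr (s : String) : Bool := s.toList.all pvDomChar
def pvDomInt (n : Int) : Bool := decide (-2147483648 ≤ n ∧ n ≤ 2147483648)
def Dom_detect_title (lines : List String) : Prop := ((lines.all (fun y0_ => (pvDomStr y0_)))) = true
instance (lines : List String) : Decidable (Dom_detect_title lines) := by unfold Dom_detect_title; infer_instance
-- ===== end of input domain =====

-- B fuses A's two sequential scans into one pass with a remembered fallback candidate (alternative decomposition, same cost).

-- line.lstrip("#").strip() — lstrip with a char set is ported by hand: dropWhile of '#' is exact for a single strip char
def pvHashTitle (line : String) : String :=
  PySem.Str.strip (String.ofList (line.toList.dropWhile (· == '#')))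

-- ===== PORT A =====
-- first loop of A: return the first heading's title
def detectTitleLoop1 : List String → Option String
  | [] => none
  | line :: rest =>
    if PySem.Str.startswith line "#" then some (pvHashTitle line)
    else detectTitleLoop1 rest

-- second loop of A: first non-empty line not starting with ```/-/* and of length ≤ 40
def detectTitleLoop2 : List String → Option String
  | [] => none
  | line :: rest =>
    let raw := PySem.Str.strip line
    if raw = "" then detectTitleLoop2 rest
    else if PySem.Str.startswith raw "```" || PySem.Str.startswith raw "-" || PySem.Str.startswith raw "*" then
      detectTitleLoop2 rest
    else if PySem.Str.len raw ≤ 40 then some raw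
    else detectTitleLoop2 rest

def detect_title (lines : List String) : String :=
  match detectTitleLoop1 lines with
  | some t => t
  | none =>
    match detectTitleLoop2 lines with
    | some t => t
    | none => "未命名架构图"

-- ===== PORT B =====
-- single pass: return on the first heading, remember the first qualifying fallback line
def detectTitleAltGo : List String → Option String → String
  | [], cand => cand.getD "未命名架构图"
  | line :: rest, cand =>
    if PySem.Str.startswith line "#" then pvHashTitle line
    else
      match cand with
      | some c => detectTitleAltGo rest (some c)
      | none =>
        let raw := PySem.Str.strip line
        if raw ≠ "" && !(PySem.Str.startswith raw "```" || PySem.Str.startswith raw "-" || PySem.Str.startswith raw "*") && PySem.Str.len raw ≤ 40 then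
          detectTitleAltGo rest (some raw)
        else detectTitleAltGo rest none

def detect_title_alt (lines : List String) : String :=
  detectTitleAltGo lines none

-- ===== PRECONDITION & SPEC =====
def Spec_detect_title (lines : List String) (out : String) : Prop := out = detect_title_alt lines
instance (lines : List String) (out : String) : Decidable (Spec_detect_title lines out) := by unfold Spec_detect_title; infer_instance

-- ===== CLAIM (what is proved, stated in full; the proofs are below) =====
def Claim_equal_detect_title : Prop := ∀ (lines : List String), Dom_detect_title lines → Spec_detect_title lines (detect_title lines)

-- ===== LEMMAS AND PROOFS =====

-- loop invariant: one pass with a candidate equals A's two-scan composition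
theorem detectTitleAltGo_eq (ls : List String) (cand : Option String) :
    detectTitleAltGo ls cand =
      match detectTitleLoop1 ls with
      | some t => t
      | none =>
        match cand with
        | some c => c
        | none =>
          match detectTitleLoop2 ls with
          | some t => t
          | none => "未命名架构图" := by
  induction ls generalizing cand with
  | nil => cases cand <;> rfl
  | cons line rest ih =>
    simp only [detectTitleAltGo, detectTitleLoop1, detectTitleLoop2]
    by_cases h1 : PySem.Str.startswith line "#" = true
    · rw [if_pos h1, if_pos h1]
    · rw [if_neg h1, if_neg h1]
      cases cand with
      | some c =>
        show detectTitleAltGo rest (some c) = _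
        rw [ih]
      | none =>
        by_cases h2 : PySem.Str.strip line = ""
        · rw [if_pos h2, if_neg (by rw [h2]; decide), ih]
        · rw [if_neg h2]
          by_cases h3 : (PySem.Str.startswith (PySem.Str.strip line) "```" || PySem.Str.startswith (PySem.Str.strip line) "-" || PySem.Str.startswith (PySem.Str.strip line) "*") = true
          · rw [if_pos h3, if_neg (by rw [h3]; simp), ih]
          · rw [if_neg h3]
            by_cases h4 : PySem.Str.len (PySem.Str.strip line) ≤ 40
            · rw [if_pos h4,
                if_pos (by rw [Bool.eq_false_iff.mpr h3, decide_eq_true h2, decide_eq_true h4]; rfl), ih]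
            · rw [if_neg h4, if_neg (by rw [decide_eq_false h4]; simp), ih]

-- ===== VERDICT (by name: the statement is the Claim_ definition above) =====
theorem detect_title_spec : Claim_equal_detect_title := by
  intro lines _
  unfold Spec_detect_title detect_title detect_title_alt
  rw [detectTitleAltGo_eq]
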